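-- pv_equiv track=rewrite | github.com/Madfarm/matrix_manipulation_scripts | password-validator/a.py | min_steps_to_strong_password
-- ===== SOURCE A (Python) =====
-- def min_steps_to_strong_password(password):
--     if len(password) < 6:
--         return 6 - len(password)
--     elif len(password) > 20:
--         return len(password) - 20
--
--     missing_types = 3
--     if any('a' <= c <= 'z' for c in password):
--         missing_types -= 1
--     if any('A' <= c <= 'Z' for c in password):
--         missing_types -= 1
--     if any(c.isdigit() for c in password):
--         missing_types -= 1
--
--     repeating_chars = [password[i] for i in range(2, len(password)) if password[i] == password[i-1] == password[i-2]]
--     steps = missing_types + len(repeating_chars)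
--
--     return steps
-- ===== SOURCE B (Python) =====
-- def min_steps_to_strong_password(password):
--     n = len(password)
--     if n < 6:
--         return 6 - n
--     if n > 20:
--         return n - 20
--
--     def classify(c):
--         if 'a' <= c <= 'z':
--             return 'lower'
--         if 'A' <= c <= 'Z':
--             return 'upper'
--         if c.isdigit():
--             return 'digit'
--         return 'other'
--
--     missing = len({'lower', 'upper', 'digit'} - {classify(c) for c in password})
--
--     triples = 0
--     i = 0
--     while i < n:
--         j = i
--         while j < n and password[j] == password[i]:
--             j += 1
--         if j - i >= 3:
--             triples += j - i - 2
--         i = j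
--     return missing + triples
-- ===== Notes on version B (the rewrite author's own statement) =====
-- stated objective: alternative
-- what changed: Missing character classes are computed by mapping each character to a class label and taking a set difference against the required labels (instead of three any() scans), and triples are counted by a two-pointer loop that jumps over maximal runs of equal characters adding run_len-2 per long run (instead of testing every index window of width 3).
import Mathlib
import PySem

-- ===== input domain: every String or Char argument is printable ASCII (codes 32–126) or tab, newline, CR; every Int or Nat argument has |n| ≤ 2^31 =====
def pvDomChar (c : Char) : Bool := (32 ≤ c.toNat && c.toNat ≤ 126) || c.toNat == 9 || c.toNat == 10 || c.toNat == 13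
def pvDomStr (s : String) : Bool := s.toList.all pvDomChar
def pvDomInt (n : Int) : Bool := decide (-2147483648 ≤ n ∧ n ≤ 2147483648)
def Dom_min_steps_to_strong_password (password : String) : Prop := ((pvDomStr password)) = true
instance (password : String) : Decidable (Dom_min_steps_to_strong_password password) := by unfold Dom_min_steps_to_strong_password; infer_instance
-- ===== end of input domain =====

-- B re-implements A with a classify-into-a-set difference for the missing character
-- classes and a two-pointer run-jumping loop for the triple count; return values proved equal.

-- ===== PORT A =====
def min_steps_to_strong_password (password : String) : Int :=
  let l := password.toList
  if l.length < 6 then 6 - (l.length : Int)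
  else if 20 < l.length then (l.length : Int) - 20
  else
    let m : Int := 3
    let m := if l.any (fun c => decide ('a' ≤ c ∧ c ≤ 'z')) then m - 1 else m
    let m := if l.any (fun c => decide ('A' ≤ c ∧ c ≤ 'Z')) then m - 1 else m
    let m := if l.any (fun c => PySem.Chars.isdigit c) then m - 1 else m
    let repeating := ((PySem.List.pyRange 2 (l.length : Int) 1).filter (fun i =>
        (PySem.List.pyGet? l i == PySem.List.pyGet? l (i - 1)) &&
        (PySem.List.pyGet? l (i - 1) == PySem.List.pyGet? l (i - 2)))).map
      (fun i => PySem.List.pyGetD l i ' ')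
    m + (repeating.length : Int)

-- ===== PORT B =====
def pvClassify (c : Char) : String :=
  if 'a' ≤ c ∧ c ≤ 'z' then "lower"
  else if 'A' ≤ c ∧ c ≤ 'Z' then "upper"
  else if PySem.Chars.isdigit c then "digit"
  else "other"

-- Source B's two-pointer loop: the inner 'while password[j]==password[i]' advance is the
-- takeWhile/dropWhile of the run at the current position, the outer loop the recursion.
def pvRunTriples : List Char → Nat
  | [] => 0
  | c :: t =>
      (if 3 ≤ (t.takeWhile (fun d => d == c)).length + 1
       then (t.takeWhile (fun d => d == c)).length + 1 - 2 else 0)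
      + pvRunTriples (t.dropWhile (fun d => d == c))
termination_by l => l.length
decreasing_by
  simp only [List.length_cons]
  have := List.length_dropWhile_le (p := fun d => d == c) t
  omega

def min_steps_to_strong_password_alt (password : String) : Int :=
  let l := password.toList
  if l.length < 6 then 6 - (l.length : Int)
  else if 20 < l.length then (l.length : Int) - 20
  else
    let missing := (PySem.Set.diff (PySem.Set.ofList ["lower", "upper", "digit"])
        (PySem.Set.ofList (l.map pvClassify))).length
    (missing : Int) + (pvRunTriples l : Int)

-- ===== PRECONDITION & SPEC =====
def Spec_min_steps_to_strong_password (password : String) (out : Int) : Prop := out = min_steps_to_strong_password_alt password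
instance (password : String) (out : Int) : Decidable (Spec_min_steps_to_strong_password password out) := by unfold Spec_min_steps_to_strong_password; infer_instance

-- ===== CLAIM (what is proved, stated in full; the proofs are below) =====
def Claim_equal_min_steps_to_strong_password : Prop := ∀ (password : String), Dom_min_steps_to_strong_password password → Spec_min_steps_to_strong_password password (min_steps_to_strong_password password)

-- ===== LEMMAS AND PROOFS =====

-- triple counter in structural window form (bridge between the two counts)
def pvH : List Char → Nat
  | a :: b :: c :: t => (if c = b ∧ b = a then 1 else 0) + pvH (b :: c :: t)
  | _ => 0

lemma pvH_drop_run (t : List Char) : ∀ c : Char,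
    pvH (c :: t) =
      (if 3 ≤ (t.takeWhile (fun d => d == c)).length + 1
       then (t.takeWhile (fun d => d == c)).length + 1 - 2 else 0)
      + pvH (t.dropWhile (fun d => d == c)) := by
  induction t with
  | nil => intro c; simp [pvH]
  | cons d t' ih =>
    intro c
    by_cases hdc : d = c
    · subst hdc
      rw [List.takeWhile_cons_of_pos (by simp), List.dropWhile_cons_of_pos (by simp)]
      cases t' with
      | nil => simp [pvH]
      | cons e t'' =>
        have hih := ih d
        simp only [pvH, List.length_cons] at hih ⊢
        by_cases hed : e = d
        · rw [List.takeWhile_cons_of_pos (by simp [hed])] at hih ⊢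
          simp only [List.length_cons] at hih ⊢
          rw [if_pos (by exact ⟨hed, trivial⟩), hih]
          split_ifs <;> omega
        · rw [List.takeWhile_cons_of_neg (by simp [hed])] at hih ⊢
          simp only [List.length_nil] at hih ⊢
          rw [if_neg (by tauto), hih]
          norm_num
    · rw [List.takeWhile_cons_of_neg (by simp [hdc]), List.dropWhile_cons_of_neg (by simp [hdc])]
      simp only [List.length_nil]
      rw [if_neg (by omega), Nat.zero_add]
      cases t' with
      | nil => simp [pvH]
      | cons e t'' => simp only [pvH]; rw [if_neg (by tauto)]; omega

lemma pvRunTriples_eq_pvH (l : List Char) : pvRunTriples l = pvH l := by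
  induction l using pvRunTriples.induct with
  | case1 => simp [pvRunTriples, pvH]
  | case2 c t ih => rw [pvRunTriples, ih, ← pvH_drop_run]

lemma pvCount_eq_pvH (l : List Char) :
    (List.range (l.length - 2)).countP
      (fun k => (l[k+2]? == l[k+1]?) && (l[k+1]? == l[k]?)) = pvH l := by
  induction l with
  | nil => rfl
  | cons a t ih =>
    cases t with
    | nil => rfl
    | cons b t' =>
      cases t' with
      | nil => rfl
      | cons c t'' =>
        have hlen : (a :: b :: c :: t'').length - 2 = ((b :: c :: t'').length - 2) + 1 := by
          simp
        rw [hlen, List.range_succ_eq_map, List.countP_cons, List.countP_map]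
        have htail : ∀ k, ((fun k => ((a :: b :: c :: t'')[k+2]? == (a :: b :: c :: t'')[k+1]?) &&
            ((a :: b :: c :: t'')[k+1]? == (a :: b :: c :: t'')[k]?)) ∘ Nat.succ) k
            = (fun k => ((b :: c :: t'')[k+2]? == (b :: c :: t'')[k+1]?) &&
               ((b :: c :: t'')[k+1]? == (b :: c :: t'')[k]?)) k := by
          intro k; simp [Function.comp]
        rw [List.countP_congr (fun k _ => by rw [htail k]), ih, pvH, Nat.add_comm]
        congr 1
        by_cases h1 : c = b <;> by_cases h2 : b = a <;> simp [h1, h2]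

lemma pvFilter_eq_count (l : List Char) :
    ((PySem.List.pyRange 2 (l.length : Int) 1).filter (fun i =>
        (PySem.List.pyGet? l i == PySem.List.pyGet? l (i - 1)) &&
        (PySem.List.pyGet? l (i - 1) == PySem.List.pyGet? l (i - 2)))).length
      = (List.range (l.length - 2)).countP
          (fun k => (l[k+2]? == l[k+1]?) && (l[k+1]? == l[k]?)) := by
  rw [PySem.List.pyRange_one, List.filter_map, List.length_map, List.countP_eq_length_filter.symm]
  have : ((l.length : Int) - 2).toNat = l.length - 2 := by omega
  rw [this]
  apply List.countP_congr
  intro k _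
  have h2 : (2 : Int) + k = ((k + 2 : Nat) : Int) := by push_cast; ring
  have h1 : ((k + 2 : Nat) : Int) - 1 = ((k + 1 : Nat) : Int) := by push_cast; ring
  have h0 : ((k + 2 : Nat) : Int) - 2 = ((k : Nat) : Int) := by push_cast; ring
  simp only [Function.comp, h2]
  simp only [h1, h0, PySem.List.pyGet?_natCast]

-- the three classes are exactly A's three tests (the ranges and the ASCII digit range are disjoint)
lemma pvClassify_lower (c : Char) :
    (pvClassify c = "lower") ↔ ('a' ≤ c ∧ c ≤ 'z') := by
  unfold pvClassify; split_ifs <;> simp_all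

lemma pvCharVals : 'A'.val.toNat = 65 ∧ 'Z'.val.toNat = 90 ∧ 'a'.val.toNat = 97
    ∧ 'z'.val.toNat = 122 ∧ '0'.val.toNat = 48 ∧ '9'.val.toNat = 57 := by decide

lemma pvLowerNotUpper (c : Char) (h : 'a' ≤ c ∧ c ≤ 'z') : ¬('A' ≤ c ∧ c ≤ 'Z') := by
  have hv := pvCharVals
  simp only [Char.le_def, UInt32.le_iff_toNat_le, not_and, not_le] at *
  omega

lemma pvLowerNotDigit (c : Char) (h : 'a' ≤ c ∧ c ≤ 'z') : ¬('0' ≤ c ∧ c ≤ '9') := by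
  have hv := pvCharVals
  simp only [Char.le_def, UInt32.le_iff_toNat_le, not_and, not_le] at *
  omega

lemma pvUpperNotDigit (c : Char) (h : 'A' ≤ c ∧ c ≤ 'Z') : ¬('0' ≤ c ∧ c ≤ '9') := by
  have hv := pvCharVals
  simp only [Char.le_def, UInt32.le_iff_toNat_le, not_and, not_le] at *
  omega

lemma pvClassify_upper (c : Char) :
    (pvClassify c = "upper") ↔ ('A' ≤ c ∧ c ≤ 'Z') := by
  unfold pvClassify
  split_ifs with h1 h2 h3
  · have := pvLowerNotUpper c h1; simp_all
  · simp [h2]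
  · simp_all
  · simp_all

lemma pvIsdigitIff (c : Char) : PySem.Chars.isdigit c = true ↔ ('0' ≤ c ∧ c ≤ '9') := by
  simp [PySem.Chars.isdigit]

lemma pvClassify_digit (c : Char) :
    (pvClassify c = "digit") ↔ PySem.Chars.isdigit c = true := by
  unfold pvClassify
  split_ifs with h1 h2 h3
  · have := pvLowerNotDigit c h1; rw [pvIsdigitIff]; simp_all
  · have := pvUpperNotDigit c h2; rw [pvIsdigitIff]; simp_all
  · simp [h3]
  · simp_all

lemma pvLabel_mem (l : List Char) (s : String) (p : Char → Bool)
    (hp : ∀ c, pvClassify c = s ↔ p c = true) :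
    (PySem.Set.contains (PySem.Set.ofList (l.map pvClassify)) s) = l.any p := by
  rcases h : l.any p with _ | _
  · simp only [List.any_eq_false] at h
    rw [Bool.eq_false_iff]
    intro hc
    rw [PySem.Set.contains_iff, PySem.Set.mem_ofList, List.mem_map] at hc
    obtain ⟨c, hcl, hcs⟩ := hc
    exact h c hcl ((hp c).mp hcs)
  · simp only [List.any_eq_true] at h
    obtain ⟨c, hcl, hpc⟩ := h
    rw [PySem.Set.contains_iff, PySem.Set.mem_ofList, List.mem_map]
    exact ⟨c, hcl, (hp c).mpr hpc⟩

-- ===== VERDICT (by name: the statement is the Claim_ definition above) =====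
theorem min_steps_to_strong_password_spec : Claim_equal_min_steps_to_strong_password := by
  intro password _
  unfold Spec_min_steps_to_strong_password
  unfold min_steps_to_strong_password min_steps_to_strong_password_alt
  set l := password.toList with hl
  by_cases h6 : l.length < 6
  · simp [h6]
  · by_cases h20 : 20 < l.length
    · simp [h6, h20]
    · simp only [if_neg h6, if_neg h20, List.length_map]
      rw [pvFilter_eq_count, pvCount_eq_pvH, ← pvRunTriples_eq_pvH]
      have hlo := pvLabel_mem l "lower" (fun c => decide ('a' ≤ c ∧ c ≤ 'z')) (by
        intro c; rw [pvClassify_lower]; simp)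
      have hup := pvLabel_mem l "upper" (fun c => decide ('A' ≤ c ∧ c ≤ 'Z')) (by
        intro c; rw [pvClassify_upper]; simp)
      have hdi := pvLabel_mem l "digit" (fun c => PySem.Chars.isdigit c) pvClassify_digit
      have hdiff : PySem.Set.diff (PySem.Set.ofList ["lower", "upper", "digit"])
          (PySem.Set.ofList (l.map pvClassify))
          = (["lower", "upper", "digit"] : List String).filter
              (fun s => !(PySem.Set.contains (PySem.Set.ofList (l.map pvClassify)) s)) := by
        simp [PySem.Set.diff, PySem.Set.ofList]
      rw [hdiff]
      simp only [List.filter, hlo, hup, hdi]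
      rcases l.any (fun c => decide ('a' ≤ c ∧ c ≤ 'z')) <;>
        rcases l.any (fun c => decide ('A' ≤ c ∧ c ≤ 'Z')) <;>
        rcases l.any (fun c => PySem.Chars.isdigit c) <;> simp
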